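-- pv_equiv track=rewrite | github.com/Salvanim/SE126 | midterm/w4CLab.py | detrmineCompareativeValue
-- ===== SOURCE A (Python) =====
-- def stringToUnicodeValues(string):
--     outputUnicode = []
--     i = 1
--     for s in string:
--         outputUnicode.append(ord(s) * i)
--         i += 1
--     return outputUnicode
--
-- def detrmineCompareativeValue(compare, compareTo):
--     compare = str(compare)
--     compareTo = str(compareTo)
--
--     compareValues = stringToUnicodeValues(compare)
--     compareToValues = stringToUnicodeValues(compareTo)
--
--     if len(compareValues) < len(compareToValues):
--         for i in range(0, len(compareToValues)):
--             if i >= len(compareValues):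
--                 compareValues.append(compareToValues[i])
--     else:
--         for i in range(0, len(compareValues)):
--             if i >= len(compareToValues):
--                 compareToValues.append(compareValues[i])
--
--     difference = []
--     for i in range(0, len(compareToValues)):
--         difference.append((compareToValues[i])-(compareValues[i]))
--
--     return abs(sum(difference))
-- ===== SOURCE B (Python) =====
-- def detrmineCompareativeValue(compare, compareTo):
--     compare = str(compare)
--     compareTo = str(compareTo)
--     total = sum((i + 1) * (ord(t) - ord(c))
--                 for i, (c, t) in enumerate(zip(compare, compareTo)))
--     return abs(total)
-- ===== Notes on version B (the rewrite author's own statement) =====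
-- stated objective: simpler
-- what changed: A's padding copies the longer list's tail into the shorter one, so those positions cancel; B drops the two weighted-value lists, the padding branch and the difference list, and computes abs of one fused weighted sum over the zipped common prefix.
import Mathlib
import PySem

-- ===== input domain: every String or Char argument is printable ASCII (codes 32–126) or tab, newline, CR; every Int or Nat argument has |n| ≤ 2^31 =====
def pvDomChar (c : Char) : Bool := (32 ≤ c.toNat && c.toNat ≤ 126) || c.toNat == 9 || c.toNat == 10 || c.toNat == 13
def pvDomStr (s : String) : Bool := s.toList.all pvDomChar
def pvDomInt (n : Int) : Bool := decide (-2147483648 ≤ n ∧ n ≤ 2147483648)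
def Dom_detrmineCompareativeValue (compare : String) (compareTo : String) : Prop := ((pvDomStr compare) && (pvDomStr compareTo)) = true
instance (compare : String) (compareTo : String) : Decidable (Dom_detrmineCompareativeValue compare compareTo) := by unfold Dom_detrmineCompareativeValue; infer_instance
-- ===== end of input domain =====

-- B replaces A's two weighted-value lists, padding branch and difference list by abs of one
-- fused weighted sum over the zipped common prefix (the padded tail positions cancel): simpler.

-- ===== PORT A =====
def pvStringToUnicodeValues (string : String) : List Int :=
  (string.toList.foldl
    (fun (st : List Int × Int) s => (st.1 ++ [(s.toNat : Int) * st.2], st.2 + 1))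
    ([], 1)).1

def detrmineCompareativeValue (compare : String) (compareTo : String) : Int :=
  let compareValues := pvStringToUnicodeValues compare
  let compareToValues := pvStringToUnicodeValues compareTo
  let p : List Int × List Int :=
    if compareValues.length < compareToValues.length then
      ((PySem.List.pyRange 0 (PySem.List.len compareToValues) 1).foldl
        (fun acc i => if (acc.length : Int) ≤ i then acc ++ [PySem.List.pyGetD compareToValues i 0] else acc)
        compareValues, compareToValues)
    else
      (compareValues,
       (PySem.List.pyRange 0 (PySem.List.len compareValues) 1).foldl
        (fun acc i => if (acc.length : Int) ≤ i then acc ++ [PySem.List.pyGetD compareValues i 0] else acc)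
        compareToValues)
  let difference := (PySem.List.pyRange 0 (PySem.List.len p.2) 1).foldl
      (fun acc i => acc ++ [PySem.List.pyGetD p.2 i 0 - PySem.List.pyGetD p.1 i 0]) []
  |difference.foldl (· + ·) 0|

-- ===== PORT B =====
def detrmineCompareativeValue_alt (compare : String) (compareTo : String) : Int :=
  |(PySem.List.enumerate (compare.toList.zip compareTo.toList) 0).foldl
    (fun t q => t + (q.1 + 1) * ((q.2.2.toNat : Int) - (q.2.1.toNat : Int))) 0|

-- ===== PRECONDITION & SPEC =====
def Spec_detrmineCompareativeValue (compare : String) (compareTo : String) (out : Int) : Prop := out = detrmineCompareativeValue_alt compare compareTo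
instance (compare : String) (compareTo : String) (out : Int) : Decidable (Spec_detrmineCompareativeValue compare compareTo out) := by unfold Spec_detrmineCompareativeValue; infer_instance

-- ===== CLAIM (what is proved, stated in full; the proofs are below) =====
def Claim_equal_detrmineCompareativeValue : Prop := ∀ (compare : String) (compareTo : String), Dom_detrmineCompareativeValue compare compareTo → Spec_detrmineCompareativeValue compare compareTo (detrmineCompareativeValue compare compareTo)

-- ===== LEMMAS AND PROOFS =====

-- weighted unicode values of a char list, starting weight i
def pvWvals : List Char → Int → List Int
  | [], _ => []
  | c :: t, i => (c.toNat : Int) * i :: pvWvals t (i + 1)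

theorem pvVals_foldl (s : List Char) : ∀ (acc : List Int) (i : Int),
    s.foldl (fun (st : List Int × Int) c => (st.1 ++ [(c.toNat : Int) * st.2], st.2 + 1)) (acc, i)
      = (acc ++ pvWvals s i, i + s.length) := by
  induction s with
  | nil => intro acc i; simp [pvWvals]
  | cons c t ih =>
      intro acc i
      simp only [List.foldl_cons, ih, pvWvals, List.length_cons, Prod.mk.injEq,
        List.append_assoc, List.singleton_append]
      exact ⟨by trivial, by push_cast; ring⟩

theorem pvVals_eq (s : String) : pvStringToUnicodeValues s = pvWvals s.toList 1 := by
  simp [pvStringToUnicodeValues, pvVals_foldl]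

theorem pvWvals_length (s : List Char) : ∀ i, (pvWvals s i).length = s.length := by
  induction s with
  | nil => intro i; rfl
  | cons c t ih => intro i; simp [pvWvals, ih]

theorem pvWvals_getD (s : List Char) : ∀ (i : Int) (k : Nat) (hk : k < s.length),
    (pvWvals s i).getD k 0 = (s[k].toNat : Int) * (i + k) := by
  induction s with
  | nil => intro i k hk; simp at hk
  | cons c t ih =>
      intro i k hk
      cases k with
      | zero => simp [pvWvals]
      | succ k =>
          simp only [pvWvals, List.getD_cons_succ, List.getElem_cons_succ]
          rw [ih (i + 1) k (by simpa using hk)]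
          push_cast
          ring

-- the padding loop of A: indices below the current length are no-ops
theorem pvPad_noop (src : List Int) (xs : List Int) (a : Nat) (h : a ≤ xs.length) :
    (PySem.List.pyRange 0 (a : Int) 1).foldl
      (fun acc i => if (acc.length : Int) ≤ i then acc ++ [PySem.List.pyGetD src i 0] else acc) xs = xs := by
  induction a with
  | zero => simp [PySem.List.pyRange_one_eq_nil]
  | succ a ih =>
      have hcast : ((a + 1 : Nat) : Int) = (a : Int) + 1 := by push_cast; ring
      rw [hcast, PySem.List.pyRange_one_succ_right (by positivity), List.foldl_append,
        ih (by omega)]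
      simp only [List.foldl_cons, List.foldl_nil]
      rw [if_neg (by omega)]

-- the padding loop of A from index a on: appends src[a], src[a+1], …
theorem pvPad_loop (src : List Int) : ∀ (k a : Nat) (acc : List Int), acc.length = a →
    (PySem.List.pyRange (a : Int) ((a : Int) + (k : Nat)) 1).foldl
      (fun acc i => if (acc.length : Int) ≤ i then acc ++ [PySem.List.pyGetD src i 0] else acc) acc
      = acc ++ (List.range k).map (fun j => PySem.List.pyGetD src ((a : Int) + (j : Nat)) 0) := by
  intro k
  induction k with
  | zero => intro a acc h; simp [PySem.List.pyRange_one_eq_nil]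
  | succ k ih =>
      intro a acc h
      rw [PySem.List.pyRange_one_cons (by push_cast; omega)]
      simp only [List.foldl_cons]
      rw [if_pos (by omega)]
      have h1 : ((a : Int) + 1) = ((a + 1 : Nat) : Int) := by push_cast; ring
      have h2 : ((a : Int) + ((k + 1 : Nat) : Int)) = ((a + 1 : Nat) : Int) + ((k : Nat) : Int) := by
        push_cast; ring
      rw [h2, h1, ih (a + 1) _ (by simp [h]), List.range_succ_eq_map, List.map_cons, List.map_map]
      have hmap : List.map ((fun j : Nat => PySem.List.pyGetD src ((a : Int) + (j : Nat)) 0) ∘ Nat.succ) (List.range k)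
          = List.map (fun j : Nat => PySem.List.pyGetD src (((a + 1 : Nat) : Int) + (j : Nat)) 0) (List.range k) := by
        apply List.map_congr_left
        intro j _
        simp only [Function.comp_apply]
        congr 1
        push_cast
        ring
      rw [hmap]
      simp

theorem pvPad_full (src xs : List Int) (h : xs.length ≤ src.length) :
    (PySem.List.pyRange 0 (PySem.List.len src) 1).foldl
      (fun acc i => if (acc.length : Int) ≤ i then acc ++ [PySem.List.pyGetD src i 0] else acc) xs
      = xs ++ (List.range (src.length - xs.length)).map
          (fun j => PySem.List.pyGetD src ((xs.length : Int) + (j : Nat)) 0) := by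
  have hs : PySem.List.len src = (src.length : Int) := by simp [PySem.List.len_eq]
  rw [hs, PySem.List.pyRange_one_append 0 (xs.length : Int) (src.length : Int)
    (by positivity) (by exact_mod_cast h), List.foldl_append, pvPad_noop src xs xs.length le_rfl]
  have h2 : (src.length : Int) = (xs.length : Int) + ((src.length - xs.length : Nat) : Int) := by
    omega
  rw [h2, pvPad_loop src (src.length - xs.length) xs.length xs rfl]

-- the common closed form: sum over k < n of (ctv.getD k - cv.getD k)
def pvPrefSum (cv ctv : List Int) (n : Nat) : Int :=
  ((List.range n).map (fun k => ctv.getD k 0 - cv.getD k 0)).sum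

-- a range-sum whose terms vanish from index a on collapses to the prefix sum
theorem pvSum_split (F : Nat → Int) (a m : Nat) (ha : a ≤ m)
    (h0 : ∀ k, a ≤ k → k < m → F k = 0) :
    ((List.range m).map F).sum = ((List.range a).map F).sum := by
  have hm : m = a + (m - a) := by omega
  rw [hm, List.range_add, List.map_append, List.sum_append]
  have hz : (List.map F (List.map (fun x => a + x) (List.range (m - a)))).sum = 0 := by
    apply List.sum_eq_zero
    intro x hx
    simp only [List.map_map, List.mem_map, List.mem_range, Function.comp_apply] at hx
    obtain ⟨j, hj, rfl⟩ := hx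
    exact h0 (a + j) (by omega) (by omega)
  rw [hz, add_zero]

-- B's fold equals abs of the same prefix sum over the weighted values
theorem pvAlt_eq (compare compareTo : String) :
    detrmineCompareativeValue_alt compare compareTo
      = |pvPrefSum (pvWvals compare.toList 1) (pvWvals compareTo.toList 1)
          (min compare.toList.length compareTo.toList.length)| := by
  unfold detrmineCompareativeValue_alt
  set ta := compare.toList with hta
  set tb := compareTo.toList with htb
  rw [PySem.List.foldl_add, zero_add]
  rw [PySem.List.enumerate_eq_map_pyRange (ta.zip tb) (' ', ' ')]
  have hlen : PySem.List.len (ta.zip tb) = ((min ta.length tb.length : Nat) : Int) := by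
    simp [List.length_zip]
  rw [hlen, PySem.List.pyRange_zero_nat, List.map_map, List.map_map]
  congr 1
  unfold pvPrefSum
  congr 1
  apply List.map_congr_left
  intro k hk
  rw [List.mem_range] at hk
  have hka : k < ta.length := lt_of_lt_of_le hk (min_le_left _ _)
  have hkb : k < tb.length := lt_of_lt_of_le hk (min_le_right _ _)
  have hkz : k < (ta.zip tb).length := by simpa [List.length_zip] using hk
  simp only [Function.comp_def, PySem.List.pyGetD_natCast]
  rw [List.getD_eq_getElem (ta.zip tb) (' ', ' ') hkz, List.getElem_zip,
    pvWvals_getD tb 1 k hkb, pvWvals_getD ta 1 k hka]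
  push_cast; ring

theorem pvPad_getD (src : List Int) (a n k : Nat) (hk : a ≤ k) (hkn : k - a < n) :
    ((List.range n).map (fun j => PySem.List.pyGetD src ((a : Int) + (j : Nat)) 0)).getD (k - a) 0
      = src.getD k 0 := by
  rw [List.getD_eq_getElem _ _ (by simpa using hkn), List.getElem_map, List.getElem_range]
  have : (a : Int) + ((k - a : Nat) : Int) = ((k : Nat) : Int) := by omega
  rw [this, PySem.List.pyGetD_natCast]

-- ===== VERDICT (by name: the statement is the Claim_ definition above) =====
theorem detrmineCompareativeValue_spec : Claim_equal_detrmineCompareativeValue := by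
  intro compare compareTo _
  unfold Spec_detrmineCompareativeValue detrmineCompareativeValue
  rw [pvAlt_eq]
  simp only [pvVals_eq]
  set ta := compare.toList with hta
  set tb := compareTo.toList with htb
  set cv := pvWvals ta 1 with hcv
  set ctv := pvWvals tb 1 with hctv
  have hla : cv.length = ta.length := pvWvals_length ta 1
  have hlb : ctv.length = tb.length := pvWvals_length tb 1
  by_cases hlt : cv.length < ctv.length
  · rw [if_pos hlt]
    dsimp only
    rw [pvPad_full ctv cv (le_of_lt hlt)]
    set pad := (List.range (ctv.length - cv.length)).map
      (fun j => PySem.List.pyGetD ctv ((cv.length : Int) + (j : Nat)) 0) with hpad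
    rw [PySem.List.foldl_append_singleton_eq_map, List.nil_append]
    rw [PySem.List.foldl_add, zero_add]
    have hlc : PySem.List.len ctv = ((ctv.length : Nat) : Int) := by simp
    rw [hlc, PySem.List.pyRange_zero_nat, List.map_map, List.map_map]
    simp only [Function.comp_def, PySem.List.pyGetD_natCast]
    congr 1
    rw [pvSum_split _ cv.length ctv.length (le_of_lt hlt) ?_]
    · unfold pvPrefSum
      have hmin : min ta.length tb.length = cv.length := by omega
      rw [hmin]
      congr 1
      apply List.map_congr_left
      intro k hk
      rw [List.mem_range] at hk
      rw [List.getD_append cv pad 0 k hk]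
    · intro k h1 h2
      rw [List.getD_append_right cv pad 0 k h1, hpad,
        pvPad_getD ctv cv.length (ctv.length - cv.length) k h1 (by omega), sub_self]
  · rw [if_neg hlt]
    dsimp only
    have hge : ctv.length ≤ cv.length := by omega
    rw [pvPad_full cv ctv hge]
    set pad := (List.range (cv.length - ctv.length)).map
      (fun j => PySem.List.pyGetD cv ((ctv.length : Int) + (j : Nat)) 0) with hpad
    rw [PySem.List.foldl_append_singleton_eq_map, List.nil_append]
    rw [PySem.List.foldl_add, zero_add]
    have hlc : PySem.List.len (ctv ++ pad) = ((cv.length : Nat) : Int) := by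
      simp [hpad]
      omega
    rw [hlc, PySem.List.pyRange_zero_nat, List.map_map, List.map_map]
    simp only [Function.comp_def, PySem.List.pyGetD_natCast]
    congr 1
    rw [pvSum_split _ ctv.length cv.length hge ?_]
    · unfold pvPrefSum
      have hmin : min ta.length tb.length = ctv.length := by omega
      rw [hmin]
      congr 1
      apply List.map_congr_left
      intro k hk
      rw [List.mem_range] at hk
      rw [List.getD_append ctv pad 0 k hk]
    · intro k h1 h2
      rw [List.getD_append_right ctv pad 0 k h1, hpad,
        pvPad_getD cv ctv.length (cv.length - ctv.length) k h1 (by omega), sub_self]
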